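-- pv_equiv track=rewrite | github.com/BYU-NLP-Lab/topicalguide | import_tool/import_scripts/analysis_import.py | _default_topic_names
-- ===== SOURCE A (Python) =====
-- from collections import defaultdict
--
-- def _default_topic_names(topic_word_counts):
--     indexed_topic_word_counts = defaultdict(list)
--
--     for (topic, word), count in topic_word_counts.items():
--         indexed_topic_word_counts[topic].append((count, word))
--
--     topic_names = dict()
--     for topic, top_words in indexed_topic_word_counts.items():
--         top_words.sort()
--         top_words.reverse()
--         name = ' '.join([x[1] for x in top_words][:2])
--         topic_names[topic] = name
--     return topic_names
-- ===== SOURCE B (Python) =====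
-- def _default_topic_names(topic_word_counts):
--     # One global sort by (count, word) descending, then a single threshold-guarded
--     # pass collecting at most two words per topic; per-group sorting disappears.
--     ordered = sorted(topic_word_counts.items(),
--                      key=lambda kv: (kv[1], kv[0][1]), reverse=True)
--     top = {}
--     for (topic, word), _count in ordered:
--         words = top.setdefault(topic, [])
--         if len(words) < 2:
--             words.append(word)
--     return {topic: ' '.join(top[topic])
--             for topic in dict.fromkeys(t for t, _w in topic_word_counts)}
-- ===== Notes on version B (the rewrite author's own statement) =====
-- stated objective: alternative
-- what changed: A groups counts per topic and then sorts, reverses and slices each group's list; B sorts all items once by (count, word) descending and makes a single threshold-guarded pass that collects at most two words per topic, so per-group sorting disappears.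
import Mathlib
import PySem

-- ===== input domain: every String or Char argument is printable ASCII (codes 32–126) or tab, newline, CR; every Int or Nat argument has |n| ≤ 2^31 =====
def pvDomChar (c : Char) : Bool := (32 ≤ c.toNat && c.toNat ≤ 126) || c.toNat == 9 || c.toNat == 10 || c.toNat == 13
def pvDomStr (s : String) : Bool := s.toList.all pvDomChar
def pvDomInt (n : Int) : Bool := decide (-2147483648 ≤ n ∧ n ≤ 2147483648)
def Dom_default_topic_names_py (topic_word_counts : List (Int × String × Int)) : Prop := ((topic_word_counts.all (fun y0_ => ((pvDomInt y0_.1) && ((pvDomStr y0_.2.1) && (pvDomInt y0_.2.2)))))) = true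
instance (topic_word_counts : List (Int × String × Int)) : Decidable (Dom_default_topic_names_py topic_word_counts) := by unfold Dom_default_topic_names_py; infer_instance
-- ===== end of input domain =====

-- B replaces A's per-topic sort/reverse/slice by one global (count, word)-descending sort
-- plus a single pass keeping at most two words per topic (objective: alternative).

-- ===== PORT A =====
def default_topic_names_py (topic_word_counts : List (Int × String × Int)) : List (Int × String) :=
  -- indexed_topic_word_counts = defaultdict(list); for (topic, word), count: append (count, word)
  let indexed : PySem.Dict Int (List (Int × String)) :=
    topic_word_counts.foldl
      (fun d p => d.insert p.1 (d.getD p.1 [] ++ [(p.2.2, p.2.1)])) ⟨[]⟩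
  -- topic_names = {}; for topic, top_words: sort; reverse; name = ' '.join([x[1] for x in top_words][:2])
  let names : PySem.Dict Int String :=
    indexed.items.foldl
      (fun tn tw =>
        let sortedTw := PySem.List.sorted2 tw.2 (fun x => x.1) (fun x => x.2) false
        let revTw := sortedTw.reverse
        tn.insert tw.1
          (PySem.Str.join " " (PySem.List.slice (revTw.map (fun x => x.2)) none (some 2))))
      ⟨[]⟩
  names.items

-- ===== PORT B =====
def default_topic_names_py_alt (topic_word_counts : List (Int × String × Int)) : List (Int × String) :=
  -- ordered = sorted(items, key=lambda kv: (kv[1], kv[0][1]), reverse=True)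
  let ordered := PySem.List.sorted2 topic_word_counts (fun p => p.2.2) (fun p => p.2.1) true
  -- single threshold-guarded pass: keep at most two words per topic
  let top : PySem.Dict Int (List String) :=
    ordered.foldl
      (fun d p =>
        let words := d.getD p.1 []
        if words.length < 2 then d.insert p.1 (words ++ [p.2.1]) else d) ⟨[]⟩
  -- {topic: ' '.join(top[topic]) for topic in dict.fromkeys(...)}; dict.fromkeys is the
  -- ordered dedup, whose keys are distinct, so the comprehension is exactly this map
  (PySem.List.dedup (topic_word_counts.map (fun p => p.1))).map
    (fun t => (t, PySem.Str.join " " (top.getD t [])))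

-- ===== PRECONDITION & SPEC =====
def Spec_default_topic_names_py (topic_word_counts : List (Int × String × Int)) (out : List (Int × String)) : Prop := out = default_topic_names_py_alt topic_word_counts
instance (topic_word_counts : List (Int × String × Int)) (out : List (Int × String)) : Decidable (Spec_default_topic_names_py topic_word_counts out) := by unfold Spec_default_topic_names_py; infer_instance

-- ===== CLAIM (what is proved, stated in full; the proofs are below) =====
def Claim_equal_default_topic_names_py : Prop := ∀ (topic_word_counts : List (Int × String × Int)), Dom_default_topic_names_py topic_word_counts → Spec_default_topic_names_py topic_word_counts (default_topic_names_py topic_word_counts)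

-- ===== LEMMAS AND PROOFS =====

-- Python's lexicographic '<' on (int, str) pairs, as the Bool comparator sorted2 uses
def pvLtP (a b : Int × String) : Bool :=
  decide (a.1 < b.1) || (!decide (b.1 < a.1) && decide (a.2 < b.2))

def pvKey (p : Int × String × Int) : Int × String := (p.2.2, p.2.1)

-- the (count, word) pairs of topic t, in input order (A's group for topic t)
def pvGA (t : Int) (l : List (Int × String × Int)) : List (Int × String) :=
  (l.filter (fun p => p.1 == t)).map pvKey

theorem pvLtP_iff (a b : Int × String) :
    pvLtP a b = true ↔ a.1 < b.1 ∨ (¬ b.1 < a.1 ∧ a.2 < b.2) := by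
  simp [pvLtP]

theorem pvLtP_asymm (a b : Int × String) (h : pvLtP a b = true) : pvLtP b a = false := by
  rw [pvLtP_iff] at h
  rw [Bool.eq_false_iff, Ne, pvLtP_iff]
  rcases h with h | ⟨h1, h2⟩
  · rintro (h' | ⟨h1', _⟩) <;> omega
  · rintro (h' | ⟨_, h2'⟩)
    · omega
    · exact absurd h2 (lt_asymm h2')

theorem pvLtP_trans (a b c : Int × String) (h1 : pvLtP a b = true) (h2 : pvLtP b c = true) :
    pvLtP a c = true := by
  rw [pvLtP_iff] at h1 h2 ⊢
  rcases h1 with h1 | ⟨h1a, h1b⟩ <;> rcases h2 with h2 | ⟨h2a, h2b⟩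
  · left; omega
  · left; omega
  · left; omega
  · right; exact ⟨by omega, lt_trans h1b h2b⟩

theorem pvLtP_antisymm (a b : Int × String) (h1 : pvLtP a b = false) (h2 : pvLtP b a = false) :
    a = b := by
  rw [Bool.eq_false_iff, Ne, pvLtP_iff] at h1 h2
  push Not at h1 h2
  have e1 : a.1 = b.1 := by
    rcases h1 with ⟨x1, _⟩; rcases h2 with ⟨y1, _⟩; omega
  have e2 : a.2 = b.2 := by
    rcases h1 with ⟨x1, x2⟩; rcases h2 with ⟨y1, y2⟩
    have := x2 (by omega)
    have := y2 (by omega)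
    exact le_antisymm (not_lt.mp ‹¬ b.2 < a.2›) (not_lt.mp ‹¬ a.2 < b.2›)
  exact Prod.ext e1 e2

theorem pvInsertBy_pairwise {α : Type} (before : α → α → Bool)
    (hasym : ∀ a b, before a b = true → before b a = false)
    (htr : ∀ a b c, before a b = true → before b c = true → before a c = true)
    (x : α) (acc : List α)
    (hp : acc.Pairwise (fun a b => before b a = false)) :
    (PySem.List.insertBy before x acc).Pairwise (fun a b => before b a = false) := by
  induction acc with
  | nil => simp [PySem.List.insertBy]
  | cons y ys ih =>
    rw [List.pairwise_cons] at hp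
    obtain ⟨h1, h2⟩ := hp
    rw [PySem.List.insertBy]
    by_cases h : before x y = true
    · rw [if_pos h]
      refine List.Pairwise.cons ?_ (List.Pairwise.cons h1 h2)
      intro z hz
      rcases List.mem_cons.mp hz with rfl | hz'
      · exact hasym _ _ h
      · by_contra hc
        have hzx : before z x = true := by
          cases hzz : before z x
          · exact absurd hzz hc
          · rfl
        have := htr z x y hzx h
        rw [h1 z hz'] at this; exact absurd this (by simp)
    · rw [if_neg h]
      refine List.Pairwise.cons ?_ (ih h2)
      intro z hz
      rcases (PySem.List.mem_insertBy before x z ys).mp hz with rfl | hz'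
      · exact Bool.eq_false_iff.mpr h
      · exact h1 z hz'

theorem pvFoldl_insertBy_pairwise {α : Type} (before : α → α → Bool)
    (hasym : ∀ a b, before a b = true → before b a = false)
    (htr : ∀ a b c, before a b = true → before b c = true → before a c = true)
    (l acc : List α)
    (hp : acc.Pairwise (fun a b => before b a = false)) :
    (l.foldl (fun acc x => PySem.List.insertBy before x acc) acc).Pairwise
      (fun a b => before b a = false) := by
  induction l generalizing acc with
  | nil => exact hp
  | cons x xs ih => exact ih _ (pvInsertBy_pairwise before hasym htr x acc hp)

theorem pvSorted2A_eq (g : List (Int × String)) :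
    PySem.List.sorted2 g (fun x => x.1) (fun x => x.2) false
      = g.foldl (fun acc x => PySem.List.insertBy pvLtP x acc) [] := rfl

theorem pvSorted2B_eq (l : List (Int × String × Int)) :
    PySem.List.sorted2 l (fun p => p.2.2) (fun p => p.2.1) true
      = l.foldl (fun acc x =>
          PySem.List.insertBy (fun a b => pvLtP (pvKey b) (pvKey a)) x acc) [] := rfl

-- two permutations, both weakly descending for the total lexicographic order, are equal
theorem pvSortedUnique (xs ys : List (Int × String)) (hperm : xs.Perm ys)
    (h1 : xs.Pairwise (fun a b => pvLtP a b = false))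
    (h2 : ys.Pairwise (fun a b => pvLtP a b = false)) : xs = ys :=
  List.Perm.eq_of_pairwise
    (fun a b _ _ hab hba => pvLtP_antisymm a b hab hba) h1 h2 hperm

theorem pvMapGet? {β : Type} (ts : List Int) (f : Int → β) (t : Int) :
    (PySem.Dict.mk (ts.map (fun u => (u, f u)))).get? t
      = if t ∈ ts then some (f t) else none := by
  induction ts with
  | nil => simp [PySem.Dict.get?]
  | cons u us ih =>
    by_cases h : u = t
    · subst h; simp [PySem.Dict.get?]
    · have hb : (u == t) = false := by simpa using h
      have : ¬ t = u := fun hh => h hh.symm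
      simp only [PySem.Dict.get?, List.map_cons, List.find?_cons, hb] at ih ⊢
      rw [ih]
      simp [List.mem_cons, this]

theorem pvMapGetD {β : Type} (ts : List Int) (f : Int → β) (t : Int) (d : β) :
    (PySem.Dict.mk (ts.map (fun u => (u, f u)))).getD t d
      = if t ∈ ts then f t else d := by
  rw [PySem.Dict.getD, pvMapGet?]; split_ifs <;> rfl

theorem pvMapContains {β : Type} (ts : List Int) (f : Int → β) (t : Int) :
    (PySem.Dict.mk (ts.map (fun u => (u, f u)))).contains t = decide (t ∈ ts) := by
  by_cases h : t ∈ ts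
  · simp only [h, decide_true]
    simp [PySem.Dict.contains, List.any_eq_true, h]
  · simp only [h, decide_false]
    rw [Bool.eq_false_iff, Ne, PySem.Dict.contains]
    simp only [List.any_eq_true, List.mem_map]
    rintro ⟨p, ⟨u, hu, rfl⟩, hp⟩
    exact h ((by simpa using hp : u = t) ▸ hu)

theorem pvDedup_append (xs : List Int) (x : Int) :
    PySem.List.dedup (xs ++ [x])
      = if x ∈ xs then PySem.List.dedup xs else PySem.List.dedup xs ++ [x] := by
  have h0 : PySem.List.dedup (xs ++ [x]) = PySem.Set.add (PySem.List.dedup xs) x := by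
    simp [PySem.List.dedup, PySem.Set.ofList, List.foldl_append]
  rw [h0, PySem.Set.add]
  have hc : PySem.Set.contains (PySem.List.dedup xs) x = decide (x ∈ xs) := by
    by_cases h : x ∈ xs
    · simp only [h, decide_true]
      rw [PySem.Set.contains_iff]
      simp [PySem.List.dedup, PySem.Set.mem_ofList, h]
    · simp only [h, decide_false]
      rw [Bool.eq_false_iff, Ne, PySem.Set.contains_iff]
      simp [PySem.List.dedup, PySem.Set.mem_ofList, h]
  rw [hc]
  by_cases h : x ∈ xs <;> simp [h]

theorem pvMemDedup (xs : List Int) (x : Int) : x ∈ PySem.List.dedup xs ↔ x ∈ xs := by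
  simp [PySem.List.dedup, PySem.Set.mem_ofList]

theorem pvGA_append (t : Int) (l : List (Int × String × Int)) (p : Int × String × Int) :
    pvGA t (l ++ [p]) = pvGA t l ++ (if p.1 = t then [pvKey p] else []) := by
  simp only [pvGA, List.filter_append, List.map_append]
  congr 1
  by_cases h : p.1 = t
  · have hb : (p.1 == t) = true := by simpa using h
    simp [List.filter, hb]
    exact h
  · have hb : (p.1 == t) = false := by simpa using h
    simp [List.filter, hb]
    exact h

theorem pvGA_nil_of_not_mem (t : Int) (l : List (Int × String × Int))
    (h : t ∉ l.map (fun p => p.1)) : pvGA t l = [] := by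
  simp only [pvGA, List.map_eq_nil_iff]
  rw [List.filter_eq_nil_iff]
  intro p hp
  simp only [beq_iff_eq]
  exact fun he => h (List.mem_map.mpr ⟨p, hp, he⟩)

theorem pvIndexed (l : List (Int × String × Int)) :
    (l.foldl (fun d p => d.insert p.1 (d.getD p.1 [] ++ [(p.2.2, p.2.1)]))
        (⟨[]⟩ : PySem.Dict Int (List (Int × String)))).items
      = (PySem.List.dedup (l.map (fun p => p.1))).map (fun t => (t, pvGA t l)) := by
  induction l using List.reverseRecOn with
  | nil => simp [PySem.List.dedup, PySem.Set.ofList, PySem.Set.empty]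
  | append_singleton l p ih =>
    rw [List.foldl_append, List.foldl_cons, List.foldl_nil]
    have hdict : (l.foldl (fun d p => d.insert p.1 (d.getD p.1 [] ++ [(p.2.2, p.2.1)]))
        (⟨[]⟩ : PySem.Dict Int (List (Int × String))))
        = PySem.Dict.mk ((PySem.List.dedup (l.map (fun p => p.1))).map
            (fun t => (t, pvGA t l))) := congrArg PySem.Dict.mk ih
    rw [hdict, List.map_append, List.map_cons, List.map_nil]
    set ts := l.map (fun p => p.1) with hts
    have hgetD := pvMapGetD (PySem.List.dedup ts) (fun t => pvGA t l) p.1 []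
    by_cases h : p.1 ∈ ts
    · have hmemd : p.1 ∈ PySem.List.dedup ts := (pvMemDedup ts p.1).mpr h
      have hcont : (PySem.Dict.mk ((PySem.List.dedup ts).map
          (fun t => (t, pvGA t l)))).contains p.1 = true := by
        rw [pvMapContains]; simpa using hmemd
      rw [PySem.Dict.items_insert_of_contains _ _ hcont]
      rw [pvDedup_append, if_pos h]
      rw [hgetD, if_pos hmemd, List.map_map]
      apply List.map_congr_left
      intro t htmem
      by_cases he : t = p.1
      · subst he
        simp only [Function.comp_apply, beq_self_eq_true, if_true]
        rw [pvGA_append, if_pos rfl]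
        simp [pvKey]
      · have hb : (t == p.1) = false := by simpa using he
        simp only [Function.comp_apply, hb]
        rw [pvGA_append]
        rw [if_neg (show ¬ p.1 = t from fun hh => he hh.symm)]
        simp
    · have hcont : (PySem.Dict.mk ((PySem.List.dedup ts).map
          (fun t => (t, pvGA t l)))).contains p.1 = false := by
        rw [pvMapContains]
        simpa using (fun hc => h ((pvMemDedup ts p.1).mp hc))
      rw [PySem.Dict.items_insert_of_not_contains _ _ hcont]
      rw [pvDedup_append, if_neg h]
      rw [hgetD, if_neg (fun hc => h ((pvMemDedup ts p.1).mp hc))]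
      rw [List.map_append, List.map_cons, List.map_nil]
      congr 1
      · apply List.map_congr_left
        intro t htmem
        have htne : ¬ p.1 = t := fun hh => h (hh ▸ (pvMemDedup ts t).mp htmem)
        rw [pvGA_append, if_neg htne]
        simp
      · rw [pvGA_append, if_pos rfl, pvGA_nil_of_not_mem p.1 l h]
        simp [pvKey]

theorem pvNamesFold (qs : List (Int × List (Int × String)))
    (g : Int × List (Int × String) → String) (acc : List (Int × String))
    (hnd : (qs.map (fun q => q.1)).Nodup)
    (hdisj : ∀ q ∈ qs, q.1 ∉ acc.map (fun r => r.1)) :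
    ((qs.foldl (fun tn q => tn.insert q.1 (g q)) (⟨acc⟩ : PySem.Dict Int String)).items)
      = acc ++ qs.map (fun q => (q.1, g q)) := by
  induction qs generalizing acc with
  | nil => simp
  | cons q qs ih =>
    rw [List.foldl_cons]
    have hcont : (PySem.Dict.mk acc).contains q.1 = false := by
      rw [Bool.eq_false_iff, Ne, PySem.Dict.contains, List.any_eq_true]
      rintro ⟨r, hr, hb⟩
      exact hdisj q (List.mem_cons_self ..) (List.mem_map.mpr ⟨r, hr, by simpa using hb⟩)
    have hins : (PySem.Dict.mk acc).insert q.1 (g q) = PySem.Dict.mk (acc ++ [(q.1, g q)]) := by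
      have := PySem.Dict.items_insert_of_not_contains (PySem.Dict.mk acc) (g q) hcont
      exact congrArg PySem.Dict.mk this
    rw [hins]
    rw [List.map_cons, List.nodup_cons] at hnd
    have := ih (acc ++ [(q.1, g q)]) hnd.2 ?_
    · rw [this]; simp
    · intro r hr
      rw [List.map_append, List.mem_append]
      rintro (hmem | hmem)
      · exact hdisj r (List.mem_cons_of_mem _ hr) hmem
      · have : r.1 = q.1 := by simpa using hmem
        exact hnd.1 (this ▸ List.mem_map.mpr ⟨r, hr, rfl⟩)

theorem pvTopFold (rest : List (Int × String × Int)) (d : PySem.Dict Int (List String))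
    (F : Int → List String) (hd : ∀ t, d.getD t [] = (F t).take 2) (t : Int) :
    (rest.foldl
        (fun d p =>
          let words := d.getD p.1 []
          if words.length < 2 then d.insert p.1 (words ++ [p.2.1]) else d) d).getD t []
      = (F t ++ (rest.filter (fun p => p.1 == t)).map (fun p => p.2.1)).take 2 := by
  induction rest generalizing d F with
  | nil => simp [hd t]
  | cons p ps ih =>
    rw [List.foldl_cons]
    have step : ∀ u, ((let words := d.getD p.1 []
          if words.length < 2 then d.insert p.1 (words ++ [p.2.1]) else d) : PySem.Dict Int (List String)).getD u []
        = ((fun v => if v = p.1 then F v ++ [p.2.1] else F v) u).take 2 := by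
      intro u
      show (if (d.getD p.1 []).length < 2 then d.insert p.1 (d.getD p.1 [] ++ [p.2.1]) else d).getD u []
        = ((if u = p.1 then F u ++ [p.2.1] else F u)).take 2
      rw [hd p.1]
      by_cases hlen : ((F p.1).take 2).length < 2
      · rw [if_pos hlen, PySem.Dict.getD_insert]
        have hflen : (F p.1).length < 2 := by
          rw [List.length_take] at hlen; omega
        by_cases he : u = p.1
        · subst he
          rw [if_pos rfl, if_pos rfl, List.take_of_length_le (by omega),
              List.take_of_length_le (by simp; omega)]
        · rw [if_neg he, if_neg he, hd u]
      · rw [if_neg hlen]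
        by_cases he : u = p.1
        · subst he
          rw [if_pos rfl, hd p.1]
          have h2 : 2 ≤ (F p.1).length := by
            rw [List.length_take] at hlen; omega
          rw [List.take_append_of_le_length h2]
        · rw [if_neg he, hd u]
    rw [ih _ _ step]
    by_cases hpt : p.1 = t
    · have hb : (p.1 == t) = true := by simpa using hpt
      rw [List.filter_cons, if_pos hb, List.map_cons]
      rw [if_pos hpt.symm]  -- hmm condition is t = p.1
      simp
    · have hb : (p.1 == t) = false := by simpa using hpt
      rw [if_neg (fun hh => hpt hh.symm)]
      simp [hb]

theorem pvMain (l : List (Int × String × Int)) :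
    default_topic_names_py l = default_topic_names_py_alt l := by
  simp only [default_topic_names_py, default_topic_names_py_alt]
  rw [pvIndexed]
  rw [pvNamesFold _ _ []
    (by
      rw [List.map_map,
        show ((fun q : Int × List (Int × String) => q.1) ∘ fun t => (t, pvGA t l)) = id from rfl,
        List.map_id]
      exact PySem.List.nodup_dedup _)
    (by intro q hq; simp)]
  rw [List.nil_append, List.map_map]
  have htop : ∀ t, ((PySem.List.sorted2 l (fun p => p.2.2) (fun p => p.2.1) true).foldl
      (fun d p =>
        let words := d.getD p.1 []
        if words.length < 2 then d.insert p.1 (words ++ [p.2.1]) else d)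
      (⟨[]⟩ : PySem.Dict Int (List String))).getD t []
      = (((PySem.List.sorted2 l (fun p => p.2.2) (fun p => p.2.1) true).filter
          (fun p => p.1 == t)).map (fun p => p.2.1)).take 2 := by
    intro t
    have := pvTopFold (PySem.List.sorted2 l (fun p => p.2.2) (fun p => p.2.1) true)
      (⟨[]⟩ : PySem.Dict Int (List String)) (fun _ => [])
      (fun t => by simp [PySem.Dict.getD, PySem.Dict.get?]) t
    simpa using this
  apply List.map_congr_left
  intro t ht
  simp only [Function.comp_apply, htop t]
  congr 1
  -- join arguments coincide
  rw [PySem.List.slice_to _ (show (0:Int) ≤ 2 by norm_num)]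
  -- the reversed per-group sort equals the filtered global sort, mapped to (count, word)
  have hR : (PySem.List.sorted2 (pvGA t l) (fun x => x.1) (fun x => x.2) false).reverse
      = ((PySem.List.sorted2 l (fun p => p.2.2) (fun p => p.2.1) true).filter
          (fun p => p.1 == t)).map pvKey := by
    apply pvSortedUnique
    · -- permutation
      refine ((List.reverse_perm _).trans (PySem.List.sorted2_perm _ _ _ _)).trans ?_
      refine List.Perm.symm (List.Perm.map pvKey ?_)
      exact List.Perm.filter _ (PySem.List.sorted2_perm _ _ _ _)
    · -- pairwise descending of A's reversed sort
      rw [List.pairwise_reverse, pvSorted2A_eq]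
      exact pvFoldl_insertBy_pairwise pvLtP pvLtP_asymm pvLtP_trans _ [] (by simp)
    · -- pairwise descending of B's filtered sort, mapped
      rw [List.pairwise_map]
      apply List.Pairwise.filter
      have := pvFoldl_insertBy_pairwise (fun a b => pvLtP (pvKey b) (pvKey a))
        (fun a b h => pvLtP_asymm _ _ h)
        (fun a b c h1 h2 => pvLtP_trans _ _ _ h2 h1)
        l [] (by simp)
      rw [pvSorted2B_eq]
      exact this
  rw [hR, List.map_map]
  rfl

-- ===== VERDICT (by name: the statement is the Claim_ definition above) =====
theorem default_topic_names_py_spec : Claim_equal_default_topic_names_py := by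
  intro topic_word_counts _hdom
  unfold Spec_default_topic_names_py
  exact pvMain topic_word_counts
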